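-- pv_equiv track=rewrite | github.com/pypi-data/pypi-mirror-8 | packages/ansiblator/ansiblator-0.6-13-28-10-2014.tar.gz/ansiblator-0.6-13-28-10-2014/ansiblator/api.py | create_argument
-- ===== SOURCE A (Python) =====
-- def create_argument(cmd, kwargs):
--     """
--     :param cmd: command to run
--     :type cmd: str
--     :param kwargs: optional arguments
--     :type kwargs: dict
--     """
--     args = " ".join("{}={}".format(k, v) for k, v in kwargs.items())
--     if args == " ":
--         args = ""
--     if cmd is None:
--         cmd = "{}".format(args)
--     else:
--         if args == "":
--             cmd = "{}".format(cmd)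
--         else:
--             cmd = "{} {}".format(cmd, args)
--     return cmd
-- ===== SOURCE B (Python) =====
-- def create_argument(cmd, kwargs):
--     out = "" if cmd is None else "{}".format(cmd)
--     started = cmd is not None
--     for k, v in kwargs.items():
--         if started:
--             out += " "
--         out += "{}={}".format(k, v)
--         started = True
--     return out
-- ===== Notes on version B (the rewrite author's own statement) =====
-- stated objective: alternative
-- what changed: Single pass that grows the result string in place with a separator-needed flag (cmd seeds the accumulator), instead of building a joined kwargs string, patching a dead args==' ' case and merging cmd and args through a nested if/else.
import Mathlib
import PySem

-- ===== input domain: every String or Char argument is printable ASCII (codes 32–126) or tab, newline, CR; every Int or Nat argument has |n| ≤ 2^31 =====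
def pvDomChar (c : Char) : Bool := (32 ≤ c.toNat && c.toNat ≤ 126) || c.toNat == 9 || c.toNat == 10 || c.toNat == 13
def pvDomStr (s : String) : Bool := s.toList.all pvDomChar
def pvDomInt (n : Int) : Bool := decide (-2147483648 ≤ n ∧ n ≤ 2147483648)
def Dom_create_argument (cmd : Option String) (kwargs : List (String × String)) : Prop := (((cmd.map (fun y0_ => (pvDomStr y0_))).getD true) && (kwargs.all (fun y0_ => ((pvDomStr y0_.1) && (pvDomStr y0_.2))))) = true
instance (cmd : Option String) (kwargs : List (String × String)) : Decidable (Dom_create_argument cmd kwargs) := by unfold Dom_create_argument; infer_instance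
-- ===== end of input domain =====

-- B grows the result in a single pass with a separator-needed flag (cmd seeds the accumulator),
-- instead of A's generator+join, dead args==" " patch and nested if/else stitching cmd to args.

-- ===== PORT A =====
-- "{}={}".format(k, v), on code points
def pvFmtKV_A (kv : String × String) : List Char := kv.1.toList ++ '=' :: kv.2.toList

def create_argument (cmd : Option String) (kwargs : List (String × String)) : String :=
  -- args = " ".join("{}={}".format(k, v) for k, v in kwargs.items())
  let args := PySem.Chars.join [' '] (kwargs.map pvFmtKV_A)
  -- if args == " ": args = ""
  let args := if args = [' '] then [] else args
  -- the nested if/else combining cmd and args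
  match cmd with
  | none => String.ofList args
  | some c => if args = [] then String.ofList c.toList else String.ofList (c.toList ++ ' ' :: args)

-- ===== PORT B =====
-- one loop step: append " " when started, then "{}={}".format(k, v); started becomes True
def pvStepB (st : List Char × Bool) (kv : String × String) : List Char × Bool :=
  ((st.1 ++ (if st.2 then [' '] else [])) ++ kv.1.toList ++ '=' :: kv.2.toList, true)

def create_argument_alt (cmd : Option String) (kwargs : List (String × String)) : String :=
  -- out = "" if cmd is None else "{}".format(cmd); started = cmd is not None
  let init : List Char × Bool := match cmd with
    | none => ([], false)
    | some c => (c.toList, true)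
  -- for k, v in kwargs.items(): …
  let fin := kwargs.foldl pvStepB init
  String.ofList fin.1

-- ===== PRECONDITION & SPEC =====
def Spec_create_argument (cmd : Option String) (kwargs : List (String × String)) (out : String) : Prop := out = create_argument_alt cmd kwargs
instance (cmd : Option String) (kwargs : List (String × String)) (out : String) : Decidable (Spec_create_argument cmd kwargs out) := by unfold Spec_create_argument; infer_instance

-- ===== CLAIM (what is proved, stated in full; the proofs are below) =====
def Claim_equal_create_argument : Prop := ∀ (cmd : Option String) (kwargs : List (String × String)), Dom_create_argument cmd kwargs → Spec_create_argument cmd kwargs (create_argument cmd kwargs)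

-- ===== LEMMAS AND PROOFS =====

-- after a 'started' state, the fold appends " " ++ the joined kwargs (when any)
theorem foldl_step_true (kwargs : List (String × String)) (p : List Char) :
    kwargs.foldl pvStepB (p, true) =
      (p ++ (if kwargs = [] then [] else ' ' :: PySem.Chars.join [' '] (kwargs.map pvFmtKV_A)), true) := by
  induction kwargs generalizing p with
  | nil => simp
  | cons kv ks ih =>
    simp only [List.foldl_cons, pvStepB, ih]
    cases ks with
    | nil => simp [PySem.Chars.join_singleton, pvFmtKV_A]
    | cons kv' ks' =>
      simp [List.map_cons, PySem.Chars.join_cons_cons, pvFmtKV_A]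

-- from a fresh state, the fold produces exactly the joined kwargs
theorem foldl_step_false (kwargs : List (String × String)) :
    (kwargs.foldl pvStepB ([], false)).1 = PySem.Chars.join [' '] (kwargs.map pvFmtKV_A) := by
  cases kwargs with
  | nil => simp [PySem.Chars.join_nil]
  | cons kv ks =>
    simp only [List.foldl_cons, pvStepB, foldl_step_true]
    cases ks with
    | nil => simp [PySem.Chars.join_singleton, pvFmtKV_A]
    | cons kv' ks' => simp [PySem.Chars.join_cons_cons, pvFmtKV_A]

-- the joined kwargs string contains '=' whenever kwargs is nonempty
theorem eq_mem_join (kv : String × String) (ks : List (String × String)) :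
    '=' ∈ PySem.Chars.join [' '] ((kv :: ks).map pvFmtKV_A) := by
  cases ks with
  | nil => simp [PySem.Chars.join_singleton, pvFmtKV_A]
  | cons kv' ks' =>
    simp only [List.map_cons, PySem.Chars.join_cons_cons]
    simp [pvFmtKV_A]

-- hence it is never the single space " "
theorem join_ne_space (kwargs : List (String × String)) :
    PySem.Chars.join [' '] (kwargs.map pvFmtKV_A) ≠ [' '] := by
  cases kwargs with
  | nil => simp [PySem.Chars.join_nil]
  | cons kv ks =>
    intro h
    have := eq_mem_join kv ks
    rw [h] at this
    simp at this

-- and never empty for nonempty kwargs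
theorem join_cons_ne_nil (kv : String × String) (ks : List (String × String)) :
    PySem.Chars.join [' '] ((kv :: ks).map pvFmtKV_A) ≠ [] := by
  intro h
  have := eq_mem_join kv ks
  rw [h] at this
  exact List.not_mem_nil this

-- ===== VERDICT (by name: the statement is the Claim_ definition above) =====
theorem create_argument_spec : Claim_equal_create_argument := by
  intro cmd kwargs _
  unfold Spec_create_argument create_argument create_argument_alt
  simp only [if_neg (join_ne_space kwargs)]
  cases cmd with
  | none => simp [foldl_step_false]
  | some c =>
    simp only [foldl_step_true]
    cases kwargs with
    | nil => simp [PySem.Chars.join_nil]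
    | cons kv ks =>
      rw [if_neg (join_cons_ne_nil kv ks)]
      simp [join_cons_ne_nil kv ks]
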